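-- pv_equiv track=rewrite | github.com/edromediaTech/EBJFL-Broadcast | scripts/import_chants_esperance.py | _parse_verses
-- ===== SOURCE A (Python) =====
-- def _parse_verses(text: str) -> list[dict]:
--     """Parse un texte en couplets/refrains."""
--     verses = []
--     current_label = ""
--     current_type = "verse"
--     current_lines = []
--
--     for line in text.strip().split("\n"):
--         line = line.strip()
--         if line.startswith("[") and "]" in line:
--             # Save previous
--             if current_lines:
--                 verses.append({
--                     "type": current_type,
--                     "label": current_label,
--                     "text": "\n".join(current_lines),
--                 })
--                 current_lines = []
--             current_label = line.strip("[]")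
--             current_type = "chorus" if "refrain" in current_label.lower() else "verse"
--         elif line == "" and current_lines:
--             # Empty line = end of section (if no brackets used)
--             pass
--         elif line:
--             current_lines.append(line)
--
--     if current_lines:
--         verses.append({
--             "type": current_type,
--             "label": current_label,
--             "text": "\n".join(current_lines),
--         })
--
--     return verses
-- ===== SOURCE B (Python) =====
-- def _parse_verses(text: str) -> list[dict]:
--     """Span-based re-implementation: split stripped lines at header lines, then emit one dict per non-empty span."""
--     lines = [l.strip() for l in text.strip().split("\n")]
--
--     def is_header(l):
--         return l.startswith("[") and "]" in l
--
--     def section(label, body):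
--         body = [l for l in body if l]
--         if not body:
--             return []
--         vtype = "chorus" if "refrain" in label.lower() else "verse"
--         return [{"type": vtype, "label": label, "text": "\n".join(body)}]
--
--     def split_at_header(xs):
--         i = 0
--         while i < len(xs) and not is_header(xs[i]):
--             i += 1
--         return xs[:i], xs[i:]
--
--     def spans(xs):
--         # xs is empty or begins with a header line
--         if not xs:
--             return []
--         body, rest = split_at_header(xs[1:])
--         return section(xs[0].strip("[]"), body) + spans(rest)
--
--     pre, rest = split_at_header(lines)
--     return section("", pre) + spans(rest)
-- ===== Notes on version B (the rewrite author's own statement) =====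
-- stated objective: alternative
-- what changed: Replaces A's running-state fold (label/type/current-lines carried across lines and flushed on each header) with a span decomposition: the stripped line list is cut at header lines and each span is turned into a section independently.
import Mathlib
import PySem

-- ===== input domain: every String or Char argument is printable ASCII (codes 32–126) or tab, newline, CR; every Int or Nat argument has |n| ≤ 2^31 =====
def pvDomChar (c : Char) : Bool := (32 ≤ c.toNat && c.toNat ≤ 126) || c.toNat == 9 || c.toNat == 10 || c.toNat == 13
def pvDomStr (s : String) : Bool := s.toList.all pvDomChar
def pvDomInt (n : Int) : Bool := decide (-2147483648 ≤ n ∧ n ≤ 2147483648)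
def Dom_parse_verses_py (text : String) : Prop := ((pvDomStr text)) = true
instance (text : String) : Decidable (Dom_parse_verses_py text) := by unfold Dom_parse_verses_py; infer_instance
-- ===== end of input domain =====

-- B replaces A's running-state flush-on-header fold by an index-free span decomposition
-- (cut the line list at header lines, then emit each span independently); objective: alternative, same O(n) cost.

-- ===== PORT A =====
-- A's loop state: (verses, current_label, current_type, current_lines); the step strips the raw line itself,
-- exactly as A's loop body does.
def pvStepA (st : List (List (String × String)) × List Char × List Char × List (List Char))
    (rawLine : List Char) :
    List (List (String × String)) × List Char × List Char × List (List Char) :=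
  let (verses, label, ctype, cur) := st
  let line := PySem.Chars.strip rawLine
  if PySem.Chars.startswith line "[".toList && PySem.Chars.isIn "]".toList line then
    let verses := if cur ≠ [] then
        verses ++ [[("type", String.ofList ctype), ("label", String.ofList label),
                    ("text", String.ofList (PySem.Chars.join "\n".toList cur))]]
      else verses
    let cur : List (List Char) := if cur ≠ [] then [] else cur
    let label := PySem.Chars.stripChars line "[]".toList
    let ctype := if PySem.Chars.isIn "refrain".toList (PySem.Chars.lower label)
      then "chorus".toList else "verse".toList
    (verses, label, ctype, cur)
  else if decide (line = []) && decide (cur ≠ []) then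
    (verses, label, ctype, cur)
  else if line ≠ [] then
    (verses, label, ctype, cur ++ [line])
  else
    (verses, label, ctype, cur)

def parse_verses_py (text : String) : List (List (String × String)) :=
  let st := ((PySem.Chars.split? (PySem.Chars.strip text.toList) "\n".toList).getD []).foldl
    pvStepA ([], [], "verse".toList, [])
  match st with
  | (verses, label, ctype, cur) =>
    if cur ≠ [] then
      verses ++ [[("type", String.ofList ctype), ("label", String.ofList label),
                  ("text", String.ofList (PySem.Chars.join "\n".toList cur))]]
    else verses

-- ===== PORT B =====
def pvIsHeader (l : List Char) : Bool :=
  PySem.Chars.startswith l "[".toList && PySem.Chars.isIn "]".toList l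

def pvSection (label : List Char) (body : List (List Char)) : List (List (String × String)) :=
  let body := body.filter (· ≠ [])
  if body = [] then []
  else
    let vtype : String := if PySem.Chars.isIn "refrain".toList (PySem.Chars.lower label)
      then "chorus" else "verse"
    [[("type", vtype), ("label", String.ofList label),
      ("text", String.ofList (PySem.Chars.join "\n".toList body))]]

-- split_at_header(xs) = (xs.takeWhile not-header, xs.dropWhile not-header)
def pvSpans : List (List Char) → List (List (String × String))
  | [] => []
  | h :: rest =>
    pvSection (PySem.Chars.stripChars h "[]".toList) (rest.takeWhile (fun l => !pvIsHeader l)) ++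
      pvSpans (rest.dropWhile (fun l => !pvIsHeader l))
  termination_by xs => xs.length
  decreasing_by
    exact Nat.lt_succ_of_le (List.length_dropWhile_le _ _)

def parse_verses_py_alt (text : String) : List (List (String × String)) :=
  let lines := ((PySem.Chars.split? (PySem.Chars.strip text.toList) "\n".toList).getD []).map
    PySem.Chars.strip
  pvSection [] (lines.takeWhile (fun l => !pvIsHeader l)) ++
    pvSpans (lines.dropWhile (fun l => !pvIsHeader l))

-- ===== PRECONDITION & SPEC =====
def Spec_parse_verses_py (text : String) (out : List (List (String × String))) : Prop := out = parse_verses_py_alt text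
instance (text : String) (out : List (List (String × String))) : Decidable (Spec_parse_verses_py text out) := by unfold Spec_parse_verses_py; infer_instance

-- ===== CLAIM (what is proved, stated in full; the proofs are below) =====
def Claim_equal_parse_verses_py : Prop := ∀ (text : String), Dom_parse_verses_py text → Spec_parse_verses_py text (parse_verses_py text)

-- ===== LEMMAS AND PROOFS =====

-- A's finalisation step (the trailing `if current_lines:` flush), named for the invariant.
def pvFinish (st : List (List (String × String)) × List Char × List Char × List (List Char)) :
    List (List (String × String)) :=
  match st with
  | (verses, label, ctype, cur) =>
    if cur ≠ [] then
      verses ++ [[("type", String.ofList ctype), ("label", String.ofList label),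
                  ("text", String.ofList (PySem.Chars.join "\n".toList cur))]]
    else verses

-- the type A's state carries is determined by the label
def pvTypeOf (label : List Char) : List Char :=
  if PySem.Chars.isIn "refrain".toList (PySem.Chars.lower label)
  then "chorus".toList else "verse".toList

lemma pvSpans_nil : pvSpans [] = [] := by rw [pvSpans.eq_def]

lemma pvSpans_cons (h : List Char) (rest : List (List Char)) :
    pvSpans (h :: rest) =
      pvSection (PySem.Chars.stripChars h "[]".toList) (rest.takeWhile (fun l => !pvIsHeader l)) ++
        pvSpans (rest.dropWhile (fun l => !pvIsHeader l)) := by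
  rw [pvSpans.eq_def]

lemma pvSection_of_filtered (label : List Char) (cur : List (List Char))
    (hcur : ∀ l ∈ cur, l ≠ []) :
    pvSection label cur =
      if cur ≠ [] then
        [[("type", String.ofList (pvTypeOf label)), ("label", String.ofList label),
          ("text", String.ofList (PySem.Chars.join "\n".toList cur))]]
      else [] := by
  have hf : cur.filter (· ≠ []) = cur := by
    apply List.filter_eq_self.mpr
    intro a ha; simpa using hcur a ha
  unfold pvSection pvTypeOf
  simp only [hf]
  by_cases h : cur = []
  · simp [h]
  · simp only [h, ne_eq, not_false_eq_true, if_true]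
    split_ifs <;> first | contradiction | rw [String.ofList_toList]

-- Main invariant: running A's fold from a well-formed state and finalising
-- equals the already-emitted verses, plus the section of the current span, plus the spans of the rest.
lemma pvInvariant (ls : List (List Char)) :
    ∀ (verses : List (List (String × String))) (label : List Char) (cur : List (List Char)),
    (∀ l ∈ cur, l ≠ []) →
    pvFinish (ls.foldl (fun st raw => pvStepA st raw) (verses, label, pvTypeOf label, cur)) =
      verses ++ pvSection label (cur ++ (ls.map PySem.Chars.strip).takeWhile (fun l => !pvIsHeader l)) ++
        pvSpans ((ls.map PySem.Chars.strip).dropWhile (fun l => !pvIsHeader l)) := by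
  induction ls with
  | nil =>
    intro verses label cur hcur
    simp only [List.foldl_nil, List.map_nil, List.takeWhile_nil, List.dropWhile_nil,
      List.append_nil, pvSpans_nil, pvFinish, pvSection_of_filtered label cur hcur]
    by_cases h : cur = [] <;> simp [h]
  | cons raw ls ih =>
    intro verses label cur hcur
    simp only [List.foldl_cons, List.map_cons, List.takeWhile_cons, List.dropWhile_cons]
    by_cases hhd : pvIsHeader (PySem.Chars.strip raw) = true
    · -- header line: A flushes; B cuts here
      have hstep : pvStepA (verses, label, pvTypeOf label, cur) raw =
          (verses ++ pvSection label cur,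
           PySem.Chars.stripChars (PySem.Chars.strip raw) "[]".toList,
           pvTypeOf (PySem.Chars.stripChars (PySem.Chars.strip raw) "[]".toList),
           ([] : List (List Char))) := by
        unfold pvStepA
        have hc1 : (PySem.Chars.startswith (PySem.Chars.strip raw) "[".toList &&
            PySem.Chars.isIn "]".toList (PySem.Chars.strip raw)) = true := by
          simpa [pvIsHeader] using hhd
        rw [pvSection_of_filtered label cur hcur]
        simp only [hc1, if_true]
        by_cases hc : cur = [] <;> simp [hc, pvTypeOf]
      rw [hstep, ih _ _ [] (by simp)]
      simp only [hhd, Bool.not_true, Bool.false_eq_true, if_false]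
      rw [pvSpans_cons]
      simp [List.append_assoc]
    · -- non-header line
      have hb : (!pvIsHeader (PySem.Chars.strip raw)) = true := by simp [hhd]
      have hcond : (PySem.Chars.startswith (PySem.Chars.strip raw) "[".toList &&
          PySem.Chars.isIn "]".toList (PySem.Chars.strip raw)) = false := by
        simpa [pvIsHeader] using hhd
      by_cases hemp : PySem.Chars.strip raw = []
      · -- empty stripped line: state unchanged, and the section filter drops it
        have hstep : pvStepA (verses, label, pvTypeOf label, cur) raw =
            (verses, label, pvTypeOf label, cur) := by
          unfold pvStepA
          simp only [hemp]
          have hc1 : (PySem.Chars.startswith ([] : List Char) "[".toList &&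
              PySem.Chars.isIn "]".toList ([] : List Char)) = false := by decide
          simp only [hc1, Bool.false_eq_true, if_false]
          by_cases hc : cur = [] <;> simp [hc]
        rw [hstep, ih _ _ _ hcur]
        simp only [hb, if_true]
        unfold pvSection
        have hfilt : ∀ tl : List (List Char),
            (cur ++ PySem.Chars.strip raw :: tl).filter (· ≠ []) = (cur ++ tl).filter (· ≠ []) := by
          intro tl; simp [hemp, List.filter_append]
        rw [hfilt]
      · -- non-empty line: appended to the current span on both sides
        have hstep : pvStepA (verses, label, pvTypeOf label, cur) raw =
            (verses, label, pvTypeOf label, cur ++ [PySem.Chars.strip raw]) := by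
          unfold pvStepA
          simp only [hcond, Bool.false_eq_true, if_false]
          simp [hemp]
        rw [hstep, ih _ _ (cur ++ [PySem.Chars.strip raw])
          (by intro l hl
              rcases List.mem_append.mp hl with h | h
              · exact hcur l h
              · simp only [List.mem_singleton] at h; subst h; exact hemp)]
        simp [hb, List.append_assoc]

-- ===== VERDICT (by name: the statement is the Claim_ definition above) =====
theorem parse_verses_py_spec : Claim_equal_parse_verses_py := by
  intro text _
  show parse_verses_py text = parse_verses_py_alt text
  unfold parse_verses_py parse_verses_py_alt
  have hty : ("verse".toList : List Char) = pvTypeOf [] := by decide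
  rw [hty]
  have := pvInvariant ((PySem.Chars.split? (PySem.Chars.strip text.toList) "\n".toList).getD [])
    [] [] [] (by simp)
  simpa [pvFinish] using this
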